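-- pv_equiv track=rewrite | github.com/aliielahi/ExpertsAndJudge4Stance | utils.py | label_text
-- ===== SOURCE A (Python) =====
-- def label_text(text, words):
-- 	text = text.lower()
-- 	words = [i.lower() for i in words]
-- 	word_count = sum(word in text for word in words)
-- 	if word_count == 1:
-- 		for i, word in enumerate(words):
-- 			if word in text:
-- 				return i
-- 	else:
-- 		return -1
-- ===== SOURCE B (Python) =====
-- def label_text(text, words):
--     low = text.lower()
--     hits = []
--     for i, word in enumerate(words):
--         if word.lower() in low:
--             hits.append(i)
--     if len(hits) == 1:
--         return hits[0]
--     return -1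
-- ===== Notes on version B (the rewrite author's own statement) =====
-- stated objective: simpler
-- what changed: One gathering pass collects the indices of matching words into a list and the result is read off its length, replacing A's count pass followed by a second rescan for the index.
import Mathlib
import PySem

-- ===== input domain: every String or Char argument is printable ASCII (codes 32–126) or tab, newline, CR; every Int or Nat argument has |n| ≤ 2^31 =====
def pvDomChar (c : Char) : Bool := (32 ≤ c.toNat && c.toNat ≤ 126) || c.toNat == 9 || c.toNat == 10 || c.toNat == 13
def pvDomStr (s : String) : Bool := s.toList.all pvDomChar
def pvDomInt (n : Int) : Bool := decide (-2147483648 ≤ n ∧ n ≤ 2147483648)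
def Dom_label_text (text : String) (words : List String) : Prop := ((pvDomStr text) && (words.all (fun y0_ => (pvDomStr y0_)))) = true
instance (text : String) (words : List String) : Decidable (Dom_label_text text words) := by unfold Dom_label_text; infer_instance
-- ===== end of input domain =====

-- B collects the indices of matching words in one pass and branches on how many there are,
-- replacing A's count-then-rescan two-pass structure (objective: simpler; return value only).

-- ===== PORT A =====
-- for i, word in enumerate(words): if word in text: return i   (first match)
def label_text_loopA (t : String) : List String → Int → Option Int
  | [], _ => none
  | w :: ws, i => if PySem.Str.isIn w t then some i else label_text_loopA t ws (i + 1)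

def label_text (text : String) (words : List String) : Int :=
  let t := PySem.Str.lower text
  let ws := words.map (fun w => PySem.Str.lower w)
  let word_count : Int := (ws.map (fun w => if PySem.Str.isIn w t then (1 : Int) else 0)).sum
  if word_count = 1 then
    match label_text_loopA t ws 0 with
    | some i => i
    | none => -1   -- unreachable: word_count = 1 guarantees the loop finds a match
  else -1

-- ===== PORT B =====
-- one pass: hits = indices i with words[i].lower() a substring of low
def label_text_hits (low : String) : List String → Int → List Int
  | [], _ => []
  | w :: ws, i =>
      if PySem.Str.isIn (PySem.Str.lower w) low then i :: label_text_hits low ws (i + 1)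
      else label_text_hits low ws (i + 1)

def label_text_alt (text : String) (words : List String) : Int :=
  let low := PySem.Str.lower text
  let hits := label_text_hits low words 0
  if hits.length = 1 then hits.headD (-1) else -1

-- ===== PRECONDITION & SPEC =====
def Spec_label_text (text : String) (words : List String) (out : Int) : Prop := out = label_text_alt text words
instance (text : String) (words : List String) (out : Int) : Decidable (Spec_label_text text words out) := by unfold Spec_label_text; infer_instance

-- ===== CLAIM (what is proved, stated in full; the proofs are below) =====
def Claim_equal_label_text : Prop := ∀ (text : String) (words : List String), Dom_label_text text words → Spec_label_text text words (label_text text words)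

-- ===== LEMMAS AND PROOFS =====

-- ===== VERDICT (by name: the statement is the Claim_ definition above) =====
-- the two traversals agree: A's first-match loop is the head of B's hit list,
-- and A's 0/1-sum is the length of B's hit list
theorem label_text_bridge (t : String) : ∀ (ws : List String) (i : Int),
    label_text_loopA t (ws.map (fun w => PySem.Str.lower w)) i = (label_text_hits t ws i).head?
    ∧ ((ws.map (fun w => PySem.Str.lower w)).map
        (fun w => if PySem.Str.isIn w t then (1 : Int) else 0)).sum
        = ((label_text_hits t ws i).length : Int) := by
  intro ws
  induction ws with
  | nil => intro i; simp [label_text_loopA, label_text_hits]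
  | cons w ws ih =>
      intro i
      obtain ⟨h1, h2⟩ := ih (i + 1)
      have h2' := h2
      simp at h2'
      by_cases hc : PySem.Chars.isIn (PySem.Chars.lower w.toList) t.toList = true
      · constructor
        · simp [label_text_loopA, label_text_hits, hc]
        · simp [label_text_hits, hc, h2']
          omega
      · simp at hc
        constructor
        · simp [label_text_loopA, label_text_hits, hc, h1]
        · simp [label_text_hits, hc, h2']
theorem label_text_spec : Claim_equal_label_text := by
  intro text words _
  unfold Spec_label_text label_text label_text_alt
  obtain ⟨h1, h2⟩ := label_text_bridge (PySem.Str.lower text) words 0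
  simp only [h1, h2]
  rcases hh : label_text_hits (PySem.Str.lower text) words 0 with _ | ⟨x, _ | ⟨y, l⟩⟩
  · simp
  · simp
  · simp
    intro h
    omega
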